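-- pv_equiv track=rewrite | github.com/Pluto00/PictureHRD | verify.py | verify_hrd
-- ===== SOURCE A (Python) =====
-- def verify_hrd(hrd):
--     positions = [hrd[i][j] for i in range(3) for j in range(3) if hrd[i][j] != -1]
--     cnt = 0
--     for i in range(len(positions)):
--         for j in range(i + 1, len(positions)):
--             if positions[i] > positions[j]:
--                 cnt += 1
--     return cnt % 2 == 0
-- ===== SOURCE B (Python) =====
-- def verify_hrd(hrd):
--     # Same tiles in row-major order, skipping -1, but counting inversions
--     # with a merge-sort (left element advances on ties, so equal values
--     # contribute no inversion, matching A's strict '>').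
--     positions = [hrd[i][j] for i in range(3) for j in range(3) if hrd[i][j] != -1]
--
--     def msort(a):
--         if len(a) < 2:
--             return a, 0
--         mid = len(a) // 2
--         left, cl = msort(a[:mid])
--         right, cr = msort(a[mid:])
--         merged = []
--         c = 0
--         i = j = 0
--         while i < len(left) and j < len(right):
--             if left[i] > right[j]:
--                 merged.append(right[j])
--                 j += 1
--                 c += len(left) - i
--             else:
--                 merged.append(left[i])
--                 i += 1
--         merged.extend(left[i:])
--         merged.extend(right[j:])
--         return merged, cl + cr + c
--
--     _, cnt = msort(positions)
--     return cnt % 2 == 0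
-- ===== Notes on version B (the rewrite author's own statement) =====
-- stated objective: alternative
-- what changed: B counts the inversions of the filtered row-major tile list with a recursive merge sort (counting cross-inversions during each merge, advancing the left element on ties) instead of A's nested index loops, then takes the same parity.
import Mathlib
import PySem

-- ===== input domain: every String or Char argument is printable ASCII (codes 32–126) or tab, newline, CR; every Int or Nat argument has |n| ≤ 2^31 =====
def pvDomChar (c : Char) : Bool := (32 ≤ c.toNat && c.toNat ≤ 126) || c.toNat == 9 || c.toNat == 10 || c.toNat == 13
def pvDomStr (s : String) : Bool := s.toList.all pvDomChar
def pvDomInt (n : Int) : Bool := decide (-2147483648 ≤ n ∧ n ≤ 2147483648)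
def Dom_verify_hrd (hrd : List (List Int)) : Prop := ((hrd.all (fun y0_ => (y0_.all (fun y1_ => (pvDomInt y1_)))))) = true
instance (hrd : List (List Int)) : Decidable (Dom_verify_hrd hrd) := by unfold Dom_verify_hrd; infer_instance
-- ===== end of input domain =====

-- B replaces A's nested-index inversion count by a merge-sort inversion counter
-- (alternative algorithm, same return value on every input A accepts).

-- ===== PORT A =====
def verify_hrd (hrd : List (List Int)) : Bool :=
  let positions := (PySem.List.pyRange 0 3 1).foldl (fun acc i =>
    (PySem.List.pyRange 0 3 1).foldl (fun acc j =>
      if PySem.List.pyGetD (PySem.List.pyGetD hrd i []) j 0 ≠ -1 then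
        acc ++ [PySem.List.pyGetD (PySem.List.pyGetD hrd i []) j 0]
      else acc) acc) []
  let cnt := (PySem.List.pyRange 0 (positions.length : Int) 1).foldl (fun c i =>
    (PySem.List.pyRange (i + 1) (positions.length : Int) 1).foldl (fun c j =>
      if PySem.List.pyGetD positions i 0 > PySem.List.pyGetD positions j 0 then c + 1 else c) c)
    (0 : Int)
  PySem.Int.mod cnt 2 == 0

-- ===== PORT B =====
-- the while loop of Source B's msort: state = (remaining left, remaining right, merged, c);
-- fuel = left.length + right.length bounds the number of loop steps, making the
-- recursion structural (the fuel-0 case is never reached with that fuel)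
def pvMergeLoop : Nat → List Int → List Int → List Int → Int → List Int × Int
  | 0, l, r, merged, c => (merged ++ l ++ r, c)
  | fuel + 1, l, r, merged, c =>
    match l, r with
    | [], r => (merged ++ [] ++ r, c)
    | l, [] => (merged ++ l ++ [], c)
    | a :: l, b :: r =>
      if a > b then pvMergeLoop fuel (a :: l) r (merged ++ [b]) (c + ((a :: l).length : Int))
      else pvMergeLoop fuel l (b :: r) (merged ++ [a]) c

-- Source B's recursive msort; fuel = the list length bounds the recursion depth
def pvMsort : Nat → List Int → List Int × Int
  | 0, a => (a, 0)
  | fuel + 1, a =>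
    if a.length < 2 then (a, 0)
    else
      let mid := a.length / 2
      let pl := pvMsort fuel (a.take mid)
      let pr := pvMsort fuel (a.drop mid)
      let pm := pvMergeLoop (pl.1.length + pr.1.length) pl.1 pr.1 [] 0
      (pm.1, pl.2 + pr.2 + pm.2)

def verify_hrd_alt (hrd : List (List Int)) : Bool :=
  let positions := (PySem.List.pyRange 0 3 1).foldl (fun acc i =>
    (PySem.List.pyRange 0 3 1).foldl (fun acc j =>
      if PySem.List.pyGetD (PySem.List.pyGetD hrd i []) j 0 ≠ -1 then
        acc ++ [PySem.List.pyGetD (PySem.List.pyGetD hrd i []) j 0]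
      else acc) acc) []
  PySem.Int.mod (pvMsort positions.length positions).2 2 == 0

-- ===== PRECONDITION & SPEC =====
-- Pre_ excludes exactly the inputs on which A raises IndexError: fewer than 3 rows,
-- or one of the first three rows with fewer than 3 entries.
def Pre_verify_hrd (hrd : List (List Int)) : Prop :=
  3 ≤ hrd.length ∧ ∀ r ∈ hrd.take 3, 3 ≤ r.length
instance (hrd : List (List Int)) : Decidable (Pre_verify_hrd hrd) := by
  unfold Pre_verify_hrd; infer_instance

def pvWitness_verify_hrd : List (List Int) := [[1, 2, 3], [4, 5, 6], [7, 8, -1]]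

def Spec_verify_hrd (hrd : List (List Int)) (out : Bool) : Prop := out = verify_hrd_alt hrd
instance (hrd : List (List Int)) (out : Bool) : Decidable (Spec_verify_hrd hrd out) := by
  unfold Spec_verify_hrd; infer_instance

-- ===== CLAIM (what is proved, stated in full; the proofs are below) =====
def Claim_equal_verify_hrd : Prop :=
  ∀ (hrd : List (List Int)), Dom_verify_hrd hrd → Pre_verify_hrd hrd →
    Spec_verify_hrd hrd (verify_hrd hrd)

-- ===== LEMMAS AND PROOFS =====

-- number of ys strictly below x / inversions of a list / cross-inversions of two lists
def pvInvc (x : Int) (ys : List Int) : Nat := ys.countP (fun y => decide (x > y))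
def pvInv : List Int → Nat
  | [] => 0
  | x :: xs => pvInvc x xs + pvInv xs
def pvCross (l r : List Int) : Nat := (l.map (fun x => pvInvc x r)).sum

theorem pvMergeLoop_acc (fuel : Nat) : ∀ (l r m : List Int) (c : Int),
    pvMergeLoop fuel l r m c = (m ++ (pvMergeLoop fuel l r [] 0).1, c + (pvMergeLoop fuel l r [] 0).2) := by
  induction fuel with
  | zero => intro l r m c; simp [pvMergeLoop]
  | succ fuel ih =>
    intro l r m c
    match l, r with
    | [], r => simp [pvMergeLoop]
    | a :: l, [] => simp [pvMergeLoop]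
    | a :: l, b :: r =>
      simp only [pvMergeLoop]
      split_ifs with h
      · rw [ih (a :: l) r (m ++ [b]), ih (a :: l) r ([] ++ [b])]
        simp [List.append_assoc]; ring
      · rw [ih l (b :: r) (m ++ [a]), ih l (b :: r) ([] ++ [a])]
        simp [List.append_assoc]

theorem pvMergeLoop_perm (fuel : Nat) : ∀ (l r : List Int), l.length + r.length ≤ fuel →
    (pvMergeLoop fuel l r [] 0).1.Perm (l ++ r) := by
  induction fuel with
  | zero => intro l r hf; simp [pvMergeLoop]
  | succ fuel ih =>
    intro l r hf
    match l, r with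
    | [], r => simp [pvMergeLoop]
    | a :: l, [] => simp [pvMergeLoop]
    | a :: l, b :: r =>
      simp only [pvMergeLoop]
      split_ifs with h
      · rw [pvMergeLoop_acc fuel (a :: l) r ([] ++ [b])]
        simp only [List.nil_append, List.cons_append]
        exact ((ih (a :: l) r (by simp at hf ⊢; omega)).cons b).trans List.perm_middle.symm
      · rw [pvMergeLoop_acc fuel l (b :: r) ([] ++ [a])]
        simp only [List.nil_append, List.cons_append]
        exact (ih l (b :: r) (by simp at hf ⊢; omega)).cons a

theorem pvMergeLoop_sorted (fuel : Nat) : ∀ (l r : List Int), l.length + r.length ≤ fuel →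
    l.Pairwise (· ≤ ·) → r.Pairwise (· ≤ ·) →
    (pvMergeLoop fuel l r [] 0).1.Pairwise (· ≤ ·) := by
  induction fuel with
  | zero =>
    intro l r hf _ _
    match l, r with
    | [], [] => simp [pvMergeLoop]
    | a :: l, r => simp at hf
    | [], b :: r => simp at hf
  | succ fuel ih =>
    intro l r hf hl hr
    match l, r with
    | [], r => simpa [pvMergeLoop] using hr
    | a :: l, [] => simpa [pvMergeLoop] using hl
    | a :: l, b :: r =>
      simp only [pvMergeLoop]
      rw [List.pairwise_cons] at hl hr
      split_ifs with h
      · rw [pvMergeLoop_acc fuel (a :: l) r ([] ++ [b])]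
        simp only [List.nil_append, List.singleton_append]
        rw [List.pairwise_cons]
        refine ⟨?_, ih (a :: l) r (by simp at hf ⊢; omega) (List.pairwise_cons.mpr hl) hr.2⟩
        intro y hy
        have := (pvMergeLoop_perm fuel (a :: l) r (by simp at hf ⊢; omega)).mem_iff.mp hy
        simp only [List.mem_append, List.mem_cons] at this
        rcases this with (rfl | hy2) | hy3
        · omega
        · have := hl.1 y hy2; omega
        · exact hr.1 y hy3
      · rw [pvMergeLoop_acc fuel l (b :: r) ([] ++ [a])]
        simp only [List.nil_append, List.singleton_append]
        rw [List.pairwise_cons]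
        refine ⟨?_, ih l (b :: r) (by simp at hf ⊢; omega) hl.2 (List.pairwise_cons.mpr hr)⟩
        intro y hy
        have := (pvMergeLoop_perm fuel l (b :: r) (by simp at hf ⊢; omega)).mem_iff.mp hy
        simp only [List.mem_append, List.mem_cons] at this
        rcases this with hy2 | (rfl | hy3)
        · exact hl.1 y hy2
        · omega
        · have := hr.1 y hy3; omega

theorem pvCross_cons_right_all (L : List Int) (b : Int) (r : List Int) (h : ∀ x ∈ L, x > b) :
    pvCross L (b :: r) = L.length + pvCross L r := by
  induction L with
  | nil => simp [pvCross]
  | cons x L ihL =>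
    have hx := h x (by simp)
    simp only [pvCross, List.map_cons, List.sum_cons, pvInvc, List.countP_cons, List.length_cons] at *
    rw [ihL (fun y hy => h y (by simp [hy]))]
    simp [hx]
    omega

theorem pvMergeLoop_count (fuel : Nat) : ∀ (l r : List Int), l.length + r.length ≤ fuel →
    l.Pairwise (· ≤ ·) → r.Pairwise (· ≤ ·) →
    (pvMergeLoop fuel l r [] 0).2 = (pvCross l r : Int) := by
  induction fuel with
  | zero =>
    intro l r hf _ _
    match l, r with
    | [], [] => simp [pvMergeLoop, pvCross]
    | a :: l, r => simp at hf
    | [], b :: r => simp at hf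
  | succ fuel ih =>
    intro l r hf hl hr
    match l, r with
    | [], r => simp [pvMergeLoop, pvCross]
    | a :: l, [] => simp [pvMergeLoop, pvCross, pvInvc]
    | a :: l, b :: r =>
      simp only [pvMergeLoop]
      rw [List.pairwise_cons] at hl hr
      split_ifs with h
      · rw [pvMergeLoop_acc fuel (a :: l) r ([] ++ [b])]
        simp only
        rw [ih (a :: l) r (by simp at hf ⊢; omega) (List.pairwise_cons.mpr hl) hr.2]
        rw [pvCross_cons_right_all (a :: l) b r
          (by intro x hx; rcases List.mem_cons.mp hx with rfl | hx2
              · omega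
              · have := hl.1 x hx2; omega)]
        push_cast
        ring
      · rw [pvMergeLoop_acc fuel l (b :: r) ([] ++ [a])]
        simp only
        rw [ih l (b :: r) (by simp at hf ⊢; omega) hl.2 (List.pairwise_cons.mpr hr)]
        have ha : pvInvc a (b :: r) = 0 := by
          simp only [pvInvc, List.countP_eq_zero]
          intro y hy
          rcases List.mem_cons.mp hy with rfl | hy2
          · simpa using by omega
          · have := hr.1 y hy2
            simpa using by omega
        simp [pvCross, ha]

theorem pvCross_perm_left {l l' : List Int} (h : l.Perm l') (r : List Int) :
    pvCross l r = pvCross l' r := by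
  unfold pvCross
  exact (h.map _).sum_eq

theorem pvCross_perm_right (l : List Int) {r r' : List Int} (h : r.Perm r') :
    pvCross l r = pvCross l r' := by
  simp only [pvCross, pvInvc]
  congr 1
  exact List.map_congr_left (fun x _ => h.countP_eq _)

theorem pvInv_append (l r : List Int) : pvInv (l ++ r) = pvInv l + pvInv r + pvCross l r := by
  induction l with
  | nil => simp [pvInv, pvCross]
  | cons x l ihl =>
    simp only [List.cons_append, pvInv, pvInvc, List.countP_append, pvCross, List.map_cons,
      List.sum_cons] at *
    omega

theorem pvMsort_spec (fuel : Nat) : ∀ (p : List Int), p.length ≤ fuel →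
    (pvMsort fuel p).1.Perm p ∧ (pvMsort fuel p).1.Pairwise (· ≤ ·) ∧
      (pvMsort fuel p).2 = (pvInv p : Int) := by
  induction fuel with
  | zero =>
    intro p hf
    have : p = [] := List.length_eq_zero_iff.mp (by omega)
    subst this
    simp [pvMsort, pvInv]
  | succ fuel ih =>
    intro p hf
    by_cases hlen : p.length < 2
    · rcases p with _ | ⟨x, _ | ⟨y, t⟩⟩
      · simp [pvMsort, pvInv]
      · simp [pvMsort, pvInv, pvInvc]
      · simp at hlen
    · simp only [pvMsort, if_neg hlen]
      have hmid1 : 1 ≤ p.length / 2 := by omega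
      have hmid2 : p.length / 2 < p.length := by omega
      obtain ⟨pl1, pl2, pl3⟩ := ih (p.take (p.length / 2)) (by simp; omega)
      obtain ⟨pr1, pr2, pr3⟩ := ih (p.drop (p.length / 2)) (by simp; omega)
      have hperm := pvMergeLoop_perm _ (pvMsort fuel (p.take (p.length / 2))).1
        (pvMsort fuel (p.drop (p.length / 2))).1 le_rfl
      refine ⟨?_, ?_, ?_⟩
      · exact hperm.trans ((pl1.append pr1).trans (by rw [List.take_append_drop]))
      · exact pvMergeLoop_sorted _ _ _ le_rfl pl2 pr2
      · rw [pvMergeLoop_count _ _ _ le_rfl pl2 pr2, pl3, pr3]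
        rw [pvCross_perm_left pl1, pvCross_perm_right _ pr1]
        have := pvInv_append (p.take (p.length / 2)) (p.drop (p.length / 2))
        rw [List.take_append_drop] at this
        omega

theorem pvSumInvNat (xs : List Int) :
    ((List.range xs.length).map (fun k => pvInvc (xs.getD k 0) (xs.drop (k + 1)))).sum
      = pvInv xs := by
  induction xs with
  | nil => simp [pvInv]
  | cons x xs ihx =>
    rw [List.length_cons, List.range_succ_eq_map]
    simp only [List.map_cons, List.map_map, List.sum_cons]
    simp only [List.getD_cons_zero]
    have h1 : pvInvc x (List.drop (0 + 1) (x :: xs)) = pvInvc x xs := by simp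
    rw [pvInv, h1, ← ihx]
    congr 1

theorem pvCntA_eq (p : List Int) :
    (PySem.List.pyRange 0 (p.length : Int) 1).foldl (fun c i =>
      (PySem.List.pyRange (i + 1) (p.length : Int) 1).foldl (fun c j =>
        if PySem.List.pyGetD p i 0 > PySem.List.pyGetD p j 0 then c + 1 else c) c)
      (0 : Int) = (pvInv p : Int) := by
  have step : ∀ (c : Int), ∀ i ∈ PySem.List.pyRange 0 (p.length : Int) 1,
      (PySem.List.pyRange (i + 1) (p.length : Int) 1).foldl (fun c j =>
        if PySem.List.pyGetD p i 0 > PySem.List.pyGetD p j 0 then c + 1 else c) c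
        = c + (pvInvc (PySem.List.pyGetD p i 0) (p.drop (i + 1).toNat) : Int) := by
    intro c i hi
    rw [PySem.List.mem_pyRange_one] at hi
    rw [show (List.foldl (fun c j => if PySem.List.pyGetD p i 0 > PySem.List.pyGetD p j 0
          then c + 1 else c) c (PySem.List.pyRange (i + 1) (p.length : Int) 1))
        = List.foldl (fun c y => if PySem.List.pyGetD p i 0 > y then c + 1 else c) c
          (List.map (fun j => PySem.List.pyGetD p j 0) (PySem.List.pyRange (i + 1) (p.length : Int) 1))
      from (List.foldl_map (f := fun j => PySem.List.pyGetD p j 0)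
        (g := fun c y => if PySem.List.pyGetD p i 0 > y then c + 1 else c)).symm]
    rw [PySem.List.map_pyGetD_pyRange' p 0 (by omega)]
    rw [PySem.List.foldl_ite_add_one]
    simp [pvInvc]
  rw [PySem.List.foldl_congr_mem _ _
    (fun c i => c + (pvInvc (PySem.List.pyGetD p i 0) (p.drop (i + 1).toNat) : Int)) 0 step]
  rw [PySem.List.foldl_add, PySem.List.pyRange_zero_natCast, List.map_map]
  rw [← pvSumInvNat p, Nat.cast_list_sum, List.map_map]
  rw [zero_add]
  congr 1
  apply List.map_congr_left
  intro k _
  simp only [Function.comp_apply, PySem.List.pyGetD_natCast]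
  have hk : ((k : Int) + 1).toNat = k + 1 := by omega
  rw [hk]

theorem pvMainEq : ∀ (hrd : List (List Int)), verify_hrd hrd = verify_hrd_alt hrd := by
  intro hrd
  simp only [verify_hrd, verify_hrd_alt]
  rw [pvCntA_eq, (pvMsort_spec _ _ le_rfl).2.2]

-- ===== VERDICT (by name: the statement is the Claim_ definition above) =====
theorem verify_hrd_spec : Claim_equal_verify_hrd := by
  intro hrd _ _
  exact pvMainEq hrd
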